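-- pv_equiv track=rewrite | github.com/cs0320-s25/term-project-aaron-alex-john-nico | Projection/Algo.py | requirements_met
-- ===== SOURCE A (Python) =====
-- from collections import defaultdict, Counter
--
-- ROSTER_LIMIT = 16
--
-- POSITION_REQUIREMENTS = {
--     'QB': {'min': 1, 'max': 3},
--     'RB': {'min': 2, 'max': 4},
--     'WR': {'min': 2, 'max': 4},
--     'TE': {'min': 1, 'max': 2},
--     'K': {'min': 1, 'max': 2},
--     'DST': {'min': 1, 'max': 2},
--     'FLEX': {'min': 1, 'max': 1},  # FLEX is a required position
-- }
--
-- def requirements_met(roster):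
--     """
--     Checks if the roster meets the specified positional requirements and constraints.
--     """
--     if len(roster) != ROSTER_LIMIT:
--         return False
--     # Count by 'position' as stored in the roster
--     position_counts = Counter(player['position'] for player in roster)
--     for position, limits in POSITION_REQUIREMENTS.items():
--         count = position_counts.get(position, 0)
--         if count < limits['min'] or count > limits['max']:
--             return False
--     return True
-- ===== SOURCE B (Python) =====
-- ROSTER_LIMIT = 16
--
-- POSITION_REQUIREMENTS = {
--     'QB': {'min': 1, 'max': 3},
--     'RB': {'min': 2, 'max': 4},
--     'WR': {'min': 2, 'max': 4},
--     'TE': {'min': 1, 'max': 2},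
--     'K': {'min': 1, 'max': 2},
--     'DST': {'min': 1, 'max': 2},
--     'FLEX': {'min': 1, 'max': 1},
-- }
--
--
-- def _run_count(runs, position):
--     """Count of a position in a run-length encoding (0 if absent)."""
--     for q, c in runs:
--         if q == position:
--             return c
--     return 0
--
--
-- def requirements_met(roster):
--     if len(roster) != ROSTER_LIMIT:
--         return False
--     # Sort the positions, then run-length encode the sorted list (equal
--     # positions are adjacent after sorting); the newest run is kept at the
--     # front of `runs`.
--     positions = sorted(player['position'] for player in roster)
--     runs = []
--     for p in positions:
--         if runs and runs[0][0] == p: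
--             runs[0] = (p, runs[0][1] + 1)
--         else:
--             runs = [(p, 1)] + runs
--     return all(limits['min'] <= _run_count(runs, position) <= limits['max']
--                for position, limits in POSITION_REQUIREMENTS.items())
-- ===== Notes on version B (the rewrite author's own statement) =====
-- stated objective: alternative
-- what changed: Replaces the Counter hash index with sort-then-scan: B sorts the positions, run-length encodes the sorted list in one pass, and validates every requirement against the run list with a chained-comparison all(); A's counting dict and early-return check loop disappear.
import Mathlib
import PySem

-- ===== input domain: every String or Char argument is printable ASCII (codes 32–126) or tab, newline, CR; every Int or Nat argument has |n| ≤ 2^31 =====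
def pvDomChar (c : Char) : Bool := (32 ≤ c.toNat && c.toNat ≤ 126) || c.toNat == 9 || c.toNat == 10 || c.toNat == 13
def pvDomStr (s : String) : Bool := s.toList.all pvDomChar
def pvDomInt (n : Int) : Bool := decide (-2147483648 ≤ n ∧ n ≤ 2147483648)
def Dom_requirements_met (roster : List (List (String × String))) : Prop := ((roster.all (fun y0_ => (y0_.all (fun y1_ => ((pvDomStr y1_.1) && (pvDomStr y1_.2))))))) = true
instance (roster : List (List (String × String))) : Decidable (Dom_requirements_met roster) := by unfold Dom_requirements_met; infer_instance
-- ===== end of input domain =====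

-- B replaces A's Counter hash index by sort-then-scan: sort the positions, run-length
-- encode the sorted list in one pass, and validate the requirements against the run list.

-- POSITION_REQUIREMENTS as (position, min, max), in dict insertion order
def pvReqs : List (String × Int × Int) :=
  [("QB", 1, 3), ("RB", 2, 4), ("WR", 2, 4), ("TE", 1, 2), ("K", 1, 2), ("DST", 1, 2), ("FLEX", 1, 1)]

-- ===== PORT A =====
-- player['position']: KeyError (none) is excluded by Pre_; the getD "" default is never reached inside Pre_
def pvPosA (player : List (String × String)) : String :=
  ((PySem.Dict.mk player).get? "position").getD ""

def pvLoopA (counts : PySem.Dict String Int) : List (String × Int × Int) → Bool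
  | [] => true
  | (position, mn, mx) :: rest =>
    let count := counts.getD position 0
    if count < mn || count > mx then false else pvLoopA counts rest

def requirements_met (roster : List (List (String × String))) : Bool :=
  if roster.length ≠ 16 then false
  else
    let position_counts := PySem.Dict.counter (roster.map pvPosA)
    pvLoopA position_counts pvReqs

-- ===== PORT B =====
def pvPosB (player : List (String × String)) : String :=
  ((PySem.Dict.mk player).get? "position").getD ""

-- one step of the run-length-encoding loop (newest run kept at the front)
def pvRleStep (runs : List (String × Int)) (p : String) : List (String × Int) :=
  match runs with
  | (q, c) :: rest => if q == p then (p, c + 1) :: rest else (p, 1) :: (q, c) :: rest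
  | [] => [(p, 1)]

-- _run_count: first run with this position, else 0
def pvRunCount (runs : List (String × Int)) (position : String) : Int :=
  match runs with
  | [] => 0
  | (q, c) :: rest => if q == position then c else pvRunCount rest position

def requirements_met_alt (roster : List (List (String × String))) : Bool :=
  if roster.length ≠ 16 then false
  else
    let positions := PySem.List.sorted (roster.map pvPosB) (fun s => s) false
    let runs := positions.foldl pvRleStep []
    pvReqs.all (fun r => decide (r.2.1 ≤ pvRunCount runs r.1 ∧ pvRunCount runs r.1 ≤ r.2.2))

-- ===== PRECONDITION & SPEC =====
-- Pre_ excludes exactly the inputs where the Python A raises KeyError: a roster of length 16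
-- containing a player without a 'position' key (B raises there too).
def Pre_requirements_met (roster : List (List (String × String))) : Prop :=
  roster.length = 16 → ∀ player ∈ roster, player.any (fun kv => kv.1 == "position")

instance (roster : List (List (String × String))) : Decidable (Pre_requirements_met roster) := by
  unfold Pre_requirements_met; infer_instance

def pvWitness_requirements_met : (List (List (String × String))) :=
  [[("position", "QB")], [("position", "RB")], [("position", "RB")], [("position", "WR")],
   [("position", "WR")], [("position", "TE")], [("position", "K")], [("position", "DST")],
   [("position", "FLEX")], [("position", "QB")], [("position", "RB")], [("position", "WR")],
   [("position", "TE")], [("position", "K")], [("position", "DST")], [("position", "QB")]]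

def Spec_requirements_met (roster : List (List (String × String))) (out : Bool) : Prop := out = requirements_met_alt roster
instance (roster : List (List (String × String))) (out : Bool) : Decidable (Spec_requirements_met roster out) := by unfold Spec_requirements_met; infer_instance

-- ===== CLAIM (what is proved, stated in full; the proofs are below) =====
def Claim_equal_requirements_met : Prop := ∀ (roster : List (List (String × String))), Dom_requirements_met roster → Pre_requirements_met roster → Spec_requirements_met roster (requirements_met roster)

-- ===== LEMMAS AND PROOFS =====

-- the run-length fold on a sorted list counts occurrences
theorem pvRunCount_eq_zero (runs : List (String × Int)) (p : String)
    (h : ∀ k ∈ runs.map Prod.fst, k ≠ p) : pvRunCount runs p = 0 := by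
  induction runs with
  | nil => rfl
  | cons hd tl ih =>
    obtain ⟨q, c⟩ := hd
    rw [pvRunCount, if_neg (by simpa using h q (by simp))]
    exact ih (fun k hk => h k (by simp [hk]))

theorem pv_fold_runCount (l : List String) : ∀ (runs : List (String × Int)),
    l.Pairwise (· ≤ ·) →
    (runs.map Prod.fst).Pairwise (fun a b => b < a) →
    (∀ q ∈ l, ∀ k ∈ runs.map Prod.fst, k ≤ q) →
    ∀ p, pvRunCount (l.foldl pvRleStep runs) p = pvRunCount runs p + l.count p := by
  induction l with
  | nil => intro runs _ _ _ p; simp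
  | cons x l ih =>
    intro runs h1 h2 h3 p
    have hx : ∀ q ∈ l, x ≤ q := (List.pairwise_cons.mp h1).1
    have h1' : l.Pairwise (· ≤ ·) := (List.pairwise_cons.mp h1).2
    have hkx : ∀ k ∈ runs.map Prod.fst, k ≤ x := h3 x (by simp)
    have key : List.Pairwise (fun a b => b < a) ((pvRleStep runs x).map Prod.fst) ∧
        (∀ k ∈ (pvRleStep runs x).map Prod.fst, k ≤ x) ∧
        (∀ q, pvRunCount (pvRleStep runs x) q = pvRunCount runs q + if x = q then 1 else 0) := by
      rcases runs with _ | ⟨⟨q0, c0⟩, rest⟩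
      · refine ⟨by simp [pvRleStep], by simp [pvRleStep], ?_⟩
        intro q
        by_cases hq : x = q <;> simp [pvRleStep, pvRunCount, hq]
      · rw [List.map_cons] at h2
        have hq0rest : ∀ b ∈ rest.map Prod.fst, b < q0 := (List.pairwise_cons.mp h2).1
        have h2rest : (rest.map Prod.fst).Pairwise (fun a b => b < a) := (List.pairwise_cons.mp h2).2
        by_cases he : q0 = x
        · subst he
          have hstep : pvRleStep ((q0, c0) :: rest) q0 = (q0, c0 + 1) :: rest := by
            simp [pvRleStep]
          refine ⟨?_, ?_, ?_⟩
          · rw [hstep, List.map_cons, List.pairwise_cons]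
            exact ⟨hq0rest, h2rest⟩
          · intro k hk
            rw [hstep, List.map_cons] at hk
            rcases List.mem_cons.mp hk with hk' | hk'
            · exact le_of_eq hk'
            · exact le_of_lt (hq0rest k hk')
          · intro q
            rw [hstep]
            by_cases hq : q0 = q
            · simp [pvRunCount, hq]
            · simp [pvRunCount, hq]
        · have hlt : q0 < x := lt_of_le_of_ne (hkx q0 (by simp)) he
          have hstep : pvRleStep ((q0, c0) :: rest) x = (x, 1) :: (q0, c0) :: rest := by
            simp [pvRleStep, he]
          have hall : ∀ k ∈ ((q0, c0) :: rest).map Prod.fst, k < x := by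
            intro k hk
            rw [List.map_cons] at hk
            rcases List.mem_cons.mp hk with hk' | hk'
            · exact hk' ▸ hlt
            · exact lt_trans (hq0rest k hk') hlt
          refine ⟨?_, ?_, ?_⟩
          · rw [hstep, List.map_cons, List.pairwise_cons]
            refine ⟨hall, ?_⟩
            rw [List.map_cons, List.pairwise_cons]
            exact ⟨hq0rest, h2rest⟩
          · intro k hk
            rw [hstep, List.map_cons] at hk
            rcases List.mem_cons.mp hk with hk' | hk'
            · exact le_of_eq hk'
            · exact le_of_lt (hall k hk')
          · intro q
            rw [hstep]
            by_cases hq : x = q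
            · subst hq
              have h0 : pvRunCount ((q0, c0) :: rest) x = 0 :=
                pvRunCount_eq_zero _ _ (fun k hk => ne_of_lt (hall k hk))
              rw [h0]
              simp [pvRunCount]
            · rw [pvRunCount, if_neg (by simpa using hq)]
              simp [hq]
    obtain ⟨k1, k2, k3⟩ := key
    have hIH := ih (pvRleStep runs x) h1' k1
      (fun q hq k hk => le_trans (k2 k hk) (hx q hq)) p
    rw [List.foldl_cons, hIH, k3 p, List.count_cons]
    by_cases hp : x = p <;> simp [hp, Ne.symm] <;> try omega

theorem pv_count_eq (roster : List (List (String × String))) (p : String) :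
    (PySem.Dict.counter (roster.map pvPosA)).getD p 0
      = pvRunCount ((PySem.List.sorted (roster.map pvPosB) (fun s => s) false).foldl pvRleStep []) p := by
  rw [PySem.Dict.getD_counter]
  rw [pv_fold_runCount _ [] (by simpa using PySem.List.sorted_pairwise (roster.map pvPosB) (fun s => s))
      (by simp) (by simp) p]
  rw [(PySem.List.sorted_perm (roster.map pvPosB) (fun s => s) false).count_eq]
  have hAB : pvPosA = pvPosB := rfl
  simp [pvRunCount, hAB]

theorem pv_loop_eq (counts : PySem.Dict String Int) (runs : List (String × Int))
    (h : ∀ p, counts.getD p 0 = pvRunCount runs p) (reqs : List (String × Int × Int)) :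
    pvLoopA counts reqs
      = reqs.all (fun r => decide (r.2.1 ≤ pvRunCount runs r.1 ∧ pvRunCount runs r.1 ≤ r.2.2)) := by
  induction reqs with
  | nil => rfl
  | cons hd tl ih =>
    obtain ⟨position, mn, mx⟩ := hd
    simp only [pvLoopA, List.all_cons, h]
    by_cases hc : pvRunCount runs position < mn ∨ mx < pvRunCount runs position
    · have : ¬ (mn ≤ pvRunCount runs position ∧ pvRunCount runs position ≤ mx) := by omega
      simp [hc, this]
    · have h1 : mn ≤ pvRunCount runs position ∧ pvRunCount runs position ≤ mx := by omega
      have h2 : ¬ (pvRunCount runs position < mn || pvRunCount runs position > mx) = true := by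
        simp; omega
      simp only [if_neg h2, ih, h1]
      simp

-- ===== VERDICT (by name: the statement is the Claim_ definition above) =====
theorem requirements_met_spec : Claim_equal_requirements_met := by
  intro roster _ _
  unfold Spec_requirements_met requirements_met requirements_met_alt
  split
  · rfl
  · exact pv_loop_eq _ _ (fun p => pv_count_eq roster p) pvReqs
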